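-- pv_equiv track=rewrite | github.com/DnfJeff/SimObliterator_Suite | src/Tools/core/bhav_rewiring.py | create_delete_mapping
-- ===== SOURCE A (Python) =====
-- from typing import Dict, List, Optional, Tuple, Set
--
-- def create_delete_mapping(
--     instruction_count: int,
--     delete_indices: List[int]
-- ) -> Dict[int, int]:
--     """
--     Create pointer mapping for deleting instructions.
--
--     Deleted instruction pointers become ERROR.
--     Remaining instructions shift down to fill gaps.
--
--     Args:
--         instruction_count: Current number of instructions
--         delete_indices: Indices to delete
--
--     Returns:
--         Mapping from old indices to new indices (deleted -> None)
--     """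
--     delete_set = set(delete_indices)
--     mapping = {}
--
--     new_index = 0
--     for old_index in range(instruction_count):
--         if old_index in delete_set:
--             # Deleted - will map to error
--             mapping[old_index] = None
--         else:
--             mapping[old_index] = new_index
--             new_index += 1
--
--     return mapping
-- ===== SOURCE B (Python) =====
-- def _bisect_left(a, x):
--     """Leftmost insertion point of x in sorted list a (hand-written: the module
--     imports nothing beyond typing, so no bisect import)."""
--     lo, hi = 0, len(a)
--     while lo < hi:
--         mid = (lo + hi) // 2
--         if a[mid] < x:
--             lo = mid + 1
--         else:
--             hi = mid
--     return lo
--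
--
-- def create_delete_mapping(instruction_count, delete_indices):
--     """Closed-form remapping: sort the distinct in-range deletes once; a kept
--     index old maps to old - (#deletes below old), found by binary search."""
--     delete_set = set(delete_indices)
--     dels = sorted(d for d in delete_set if 0 <= d < instruction_count)
--     return {old: (None if old in delete_set else old - _bisect_left(dels, old))
--             for old in range(instruction_count)}
-- ===== Notes on version B (the rewrite author's own statement) =====
-- stated objective: alternative
-- what changed: Replaces A's sequential running counter with a closed-form per-index formula: sort the distinct in-range delete indices once, then each kept index maps to old minus the number of deletes below it, obtained by binary search (bisect_left) instead of accumulated state.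
import Mathlib
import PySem

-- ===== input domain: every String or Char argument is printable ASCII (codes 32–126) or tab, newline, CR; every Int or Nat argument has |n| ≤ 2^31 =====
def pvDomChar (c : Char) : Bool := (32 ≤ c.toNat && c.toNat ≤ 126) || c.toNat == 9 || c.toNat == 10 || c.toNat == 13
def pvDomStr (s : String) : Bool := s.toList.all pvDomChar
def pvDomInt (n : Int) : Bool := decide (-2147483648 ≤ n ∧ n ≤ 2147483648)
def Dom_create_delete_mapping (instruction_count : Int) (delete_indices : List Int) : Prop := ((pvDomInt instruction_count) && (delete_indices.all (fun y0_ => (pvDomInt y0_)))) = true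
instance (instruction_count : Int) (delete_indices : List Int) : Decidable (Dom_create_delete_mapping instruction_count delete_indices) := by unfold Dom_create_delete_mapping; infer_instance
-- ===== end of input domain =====

-- B replaces A's running counter with a closed-form per-index offset: sort the distinct
-- in-range deletes once, then each kept index maps to old - (#deletes below old), found
-- by binary search (alternative decomposition, similar cost).

-- ===== PORT A =====
def create_delete_mapping (instruction_count : Int) (delete_indices : List Int) : List (Int × Option Int) :=
  let delete_set : PySem.Set Int := PySem.Set.ofList delete_indices
  let res := (PySem.List.pyRange 0 instruction_count 1).foldl
    (fun (st : PySem.Dict Int (Option Int) × Int) old_index =>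
      if PySem.Set.contains delete_set old_index then
        (st.1.insert old_index none, st.2)
      else
        (st.1.insert old_index (some st.2), st.2 + 1))
    (PySem.Dict.empty, 0)
  res.1.items

-- ===== PORT B =====
-- Source B's hand-written _bisect_left, ported step for step (lo, hi, mid are Python ints
-- that stay in [0, len(a)]; a[mid] has 0 ≤ mid < hi ≤ len(a) whenever it is evaluated,
-- so List.getD is exact there)
def pvBisectLeft (a : List Int) (x : Int) (lo hi : Nat) : Nat :=
  if lo < hi then
    let mid := (lo + hi) / 2
    if a.getD mid 0 < x then pvBisectLeft a x (mid + 1) hi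
    else pvBisectLeft a x lo mid
  else lo
termination_by hi - lo
decreasing_by all_goals omega

-- Source B's 'dels = sorted(d for d in delete_set if 0 <= d < instruction_count)'
-- (sorted without key over a set: result is order-independent)
def pvDels (instruction_count : Int) (delete_indices : List Int) : List Int :=
  PySem.List.sorted
    ((PySem.Set.ofList delete_indices).filter
      (fun d => decide (0 ≤ d) && decide (d < instruction_count)))
    (fun x => x) false

def create_delete_mapping_alt (instruction_count : Int) (delete_indices : List Int) : List (Int × Option Int) :=
  (PySem.List.pyRange 0 instruction_count 1).map (fun old =>
    (old,
      if PySem.Set.contains (PySem.Set.ofList delete_indices) old then none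
      else some (old - (pvBisectLeft (pvDels instruction_count delete_indices) old 0
                          (pvDels instruction_count delete_indices).length : Int))))

-- ===== PRECONDITION & SPEC =====
def Spec_create_delete_mapping (instruction_count : Int) (delete_indices : List Int) (out : List (Int × Option Int)) : Prop := out = create_delete_mapping_alt instruction_count delete_indices
instance (instruction_count : Int) (delete_indices : List Int) (out : List (Int × Option Int)) : Decidable (Spec_create_delete_mapping instruction_count delete_indices out) := by unfold Spec_create_delete_mapping; infer_instance

-- ===== CLAIM (what is proved, stated in full; the proofs are below) =====
def Claim_equal_create_delete_mapping : Prop := ∀ (instruction_count : Int) (delete_indices : List Int), Dom_create_delete_mapping instruction_count delete_indices → Spec_create_delete_mapping instruction_count delete_indices (create_delete_mapping instruction_count delete_indices)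

-- ===== LEMMAS AND PROOFS =====

-- count of kept indices strictly below k
def pvCnt (S : PySem.Set Int) (k : Int) : Nat :=
  ((PySem.List.pyRange 0 k 1).filter (fun i => !(PySem.Set.contains S i))).length

-- the common closed-form value at index i
def pvVal (S : PySem.Set Int) (i : Int) : Option Int :=
  if PySem.Set.contains S i then none else some (pvCnt S i : Int)

-- A's loop invariant: after processing range(0, n) the dict items are the closed-form map
theorem pv_foldA (S : PySem.Set Int) (n : Nat) :
    ((PySem.List.pyRange 0 (n : Int) 1).foldl
      (fun (st : PySem.Dict Int (Option Int) × Int) old =>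
        if PySem.Set.contains S old then (st.1.insert old none, st.2)
        else (st.1.insert old (some st.2), st.2 + 1))
      (PySem.Dict.empty, 0)) =
    (PySem.Dict.mk ((PySem.List.pyRange 0 (n : Int) 1).map (fun i => (i, pvVal S i))),
      (pvCnt S (n : Int) : Int)) := by
  induction n with
  | zero =>
    rw [show ((0 : Nat) : Int) = 0 from rfl, PySem.List.pyRange_one_eq_nil (le_refl 0)]
    rfl
  | succ n ih =>
    have hcast : ((n + 1 : Nat) : Int) = (n : Int) + 1 := by push_cast; ring
    have hsplit : PySem.List.pyRange 0 ((n : Int) + 1) 1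
        = PySem.List.pyRange 0 (n : Int) 1 ++ [(n : Int)] :=
      PySem.List.pyRange_one_succ_right (by positivity)
    have hcontains : (PySem.Dict.mk ((PySem.List.pyRange 0 (n : Int) 1).map
        (fun i => (i, pvVal S i)))).contains (n : Int) = false := by
      rw [PySem.Dict.contains_mk, List.any_eq_false]
      intro p hp
      rcases List.mem_map.mp hp with ⟨i, hi, rfl⟩
      have := (PySem.List.mem_pyRange_one.mp hi).2
      simp only [beq_iff_eq]
      omega
    have hcnt : pvCnt S ((n : Int) + 1)
        = pvCnt S (n : Int) + (if PySem.Set.contains S (n : Int) then 0 else 1) := by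
      unfold pvCnt
      rw [hsplit, List.filter_append, List.length_append]
      by_cases h : PySem.Set.contains S (n : Int)
      · simp only [List.filter_cons, List.filter_nil, h, Bool.not_true, if_true]
        simp
      · simp only [List.filter_cons, List.filter_nil]
        rw [Bool.eq_false_iff.mpr h]
        simp
    rw [hcast, hsplit, List.foldl_append, ih]
    simp only [List.foldl_cons, List.foldl_nil]
    by_cases h : PySem.Set.contains S (n : Int)
    · rw [if_pos h]
      refine Prod.ext ?_ ?_
      · apply PySem.Dict.ext
        rw [PySem.Dict.items_insert_of_not_contains _ _ hcontains]
        simp only [List.map_append, List.map_cons, List.map_nil, pvVal, h, if_true]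
      · simp only [hcnt, h, if_true]
        push_cast
        ring
    · rw [if_neg h]
      refine Prod.ext ?_ ?_
      · apply PySem.Dict.ext
        rw [PySem.Dict.items_insert_of_not_contains _ _ hcontains]
        simp only [List.map_append, List.map_cons, List.map_nil, pvVal]
        have hm : (n : Int) ∉ S := fun hmem => h ((PySem.Set.contains_iff S _).mpr hmem)
        simp [hm]
      · simp only [hcnt]
        rw [if_neg h]
        push_cast
        ring

-- if everything below lo satisfies p and nothing from lo on does, the filter has length lo
theorem pv_filter_cut (a : List Int) (x : Int) (lo : Nat) (hlo : lo ≤ a.length)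
    (h1 : ∀ j (_ : j < a.length), j < lo → a[j] < x)
    (h2 : ∀ j (_ : j < a.length), lo ≤ j → ¬ a[j] < x) :
    (a.filter (fun y => decide (y < x))).length = lo := by
  conv_lhs => rw [← List.take_append_drop lo a]
  rw [List.filter_append, List.length_append]
  have htake : (a.take lo).filter (fun y => decide (y < x)) = a.take lo := by
    apply List.filter_eq_self.mpr
    intro y hy
    rw [List.mem_take_iff_getElem] at hy
    obtain ⟨i, hi, rfl⟩ := hy
    exact decide_eq_true (h1 i (by omega) (by omega))
  have hdrop : (a.drop lo).filter (fun y => decide (y < x)) = [] := by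
    apply List.filter_eq_nil_iff.mpr
    intro y hy
    obtain ⟨i, hi, rfl⟩ := List.mem_iff_getElem.mp hy
    rw [List.getElem_drop]
    simpa using h2 (lo + i) (by simp at hi; omega) (by omega)
  rw [htake, hdrop, List.length_take]
  simp [Nat.min_eq_left hlo]

-- Source B's binary search counts the elements below x in a sorted list
theorem pv_bisect_filter (a : List Int) (x : Int) (hmono : a.Pairwise (· ≤ ·))
    (lo hi : Nat) (hlo : lo ≤ hi) (hhi : hi ≤ a.length)
    (h1 : ∀ j (_ : j < a.length), j < lo → a[j] < x)
    (h2 : ∀ j (_ : j < a.length), hi ≤ j → ¬ a[j] < x) :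
    pvBisectLeft a x lo hi = (a.filter (fun y => decide (y < x))).length := by
  have hm : ∀ i j (_ : i < a.length) (hj : j < a.length), i ≤ j → a[i] ≤ a[j] := by
    intro i j hi hj hij
    rcases Nat.lt_or_ge i j with h | h
    · exact List.pairwise_iff_getElem.mp hmono i j hi hj h
    · have : i = j := by omega
      subst this; exact le_refl _
  fun_induction pvBisectLeft a x lo hi with
  | case1 lo hi hlh mid hmid ih =>
    -- a[mid] < x : recurse on [mid+1, hi)
    have hmlt : mid < a.length := by simp only [mid] at *; omega
    have hmv : a[mid] < x := by rwa [List.getD_eq_getElem a 0 hmlt] at hmid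
    apply ih (by simp only [mid] at *; omega) hhi
    · intro j hj hjlt
      exact lt_of_le_of_lt (hm j mid hj hmlt (by omega)) hmv
    · exact h2
  | case2 lo hi hlh mid hmid ih =>
    -- ¬ a[mid] < x : recurse on [lo, mid)
    have hmlt : mid < a.length := by simp only [mid] at *; omega
    have hmv : ¬ a[mid] < x := by rwa [List.getD_eq_getElem a 0 hmlt] at hmid
    apply ih (by simp only [mid] at *; omega) (by omega) h1
    intro j hj hjge hcon
    exact hmv (lt_of_le_of_lt (hm mid j hmlt hj hjge) hcon)
  | case3 lo hi hlh =>
    have : lo = hi := by omega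
    subst this
    exact (pv_filter_cut a x lo hhi h1 (fun j hj hge => h2 j hj hge)).symm

-- kept count below i equals i minus the number of (distinct, in-range) deletes below i
theorem pv_cnt_closed (delete_indices : List Int) (ic i : Int) (h0 : 0 ≤ i) (hic : i < ic) :
    (pvCnt (PySem.Set.ofList delete_indices) i : Int)
      = i - (pvBisectLeft (pvDels ic delete_indices) i 0 (pvDels ic delete_indices).length : Int) := by
  set S : PySem.Set Int := PySem.Set.ofList delete_indices with hS
  set inr := S.filter (fun d => decide (0 ≤ d) && decide (d < ic)) with hinr
  have hSnd : S.Nodup := PySem.Set.nodup_ofList delete_indices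
  have hinrnd : inr.Nodup := hSnd.filter _
  have hperm : (pvDels ic delete_indices).Perm inr := PySem.List.sorted_perm _ _ _
  have hmono : (pvDels ic delete_indices).Pairwise (· ≤ ·) := by
    have := PySem.List.sorted_pairwise (xs := inr) (key := fun x => x)
    simpa [pvDels, hinr, hS] using this
  have hb := pv_bisect_filter (pvDels ic delete_indices) i hmono 0
    (pvDels ic delete_indices).length (by omega) (le_refl _)
    (by intro j hj hlt; omega) (by intro j hj hge; omega)
  have hlen1 : ((pvDels ic delete_indices).filter (fun y => decide (y < i))).length
      = ((inr.filter (fun y => decide (y < i)))).length :=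
    (hperm.filter _).length_eq
  have hL1nd : (inr.filter (fun y => decide (y < i))).Nodup := hinrnd.filter _
  have hL2nd : ((PySem.List.pyRange 0 i 1).filter (fun j => PySem.Set.contains S j)).Nodup :=
    (PySem.List.nodup_pyRange_one 0 i).filter _
  have hlen2 : (inr.filter (fun y => decide (y < i))).length
      = ((PySem.List.pyRange 0 i 1).filter (fun j => PySem.Set.contains S j)).length := by
    apply List.Perm.length_eq
    apply (List.perm_ext_iff_of_nodup hL1nd hL2nd).mpr
    intro x
    simp only [hinr, List.mem_filter, PySem.List.mem_pyRange_one,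
      Bool.and_eq_true, decide_eq_true_eq, PySem.Set.contains_iff]
    constructor
    · rintro ⟨⟨hxS, hx0, _⟩, hxi⟩
      exact ⟨⟨hx0, hxi⟩, hxS⟩
    · rintro ⟨⟨hx0, hxi⟩, hxS⟩
      exact ⟨⟨hxS, hx0, by omega⟩, hxi⟩
  have hpart : ((PySem.List.pyRange 0 i 1).filter (fun j => PySem.Set.contains S j)).length
      + ((PySem.List.pyRange 0 i 1).filter (fun j => !(PySem.Set.contains S j))).length
      = (PySem.List.pyRange 0 i 1).length :=
    Eq.symm (List.length_eq_length_filter_add _)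
  have hrlen : (PySem.List.pyRange 0 i 1).length = (i - 0).toNat :=
    PySem.List.length_pyRange_one 0 i
  unfold pvCnt
  rw [hb, hlen1, hlen2]
  omega

-- B's per-index value equals the closed form, for i in range(instruction_count)
theorem pv_B_val (delete_indices : List Int) (ic i : Int)
    (hi : i ∈ PySem.List.pyRange 0 ic 1) :
    (if PySem.Set.contains (PySem.Set.ofList delete_indices) i then none
     else some (i - (pvBisectLeft (pvDels ic delete_indices) i 0
                      (pvDels ic delete_indices).length : Int)))
    = pvVal (PySem.Set.ofList delete_indices) i := by
  have hmem := PySem.List.mem_pyRange_one.mp hi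
  unfold pvVal
  by_cases h : PySem.Set.contains (PySem.Set.ofList delete_indices) i
  · rw [if_pos h, if_pos h]
  · rw [if_neg h, if_neg h, pv_cnt_closed delete_indices ic i hmem.1 hmem.2]

-- ===== VERDICT (by name: the statement is the Claim_ definition above) =====
theorem create_delete_mapping_spec : Claim_equal_create_delete_mapping := by
  intro ic di _
  unfold Spec_create_delete_mapping create_delete_mapping create_delete_mapping_alt
  by_cases hic : ic ≤ 0
  · rw [PySem.List.pyRange_one_eq_nil hic]
    simp [PySem.Dict.empty]
  · rw [not_le] at hic
    have hcast : ((ic.toNat : Nat) : Int) = ic := Int.toNat_of_nonneg (le_of_lt hic)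
    set S := PySem.Set.ofList di with hS
    calc ((PySem.List.pyRange 0 ic 1).foldl
            (fun (st : PySem.Dict Int (Option Int) × Int) old =>
              if PySem.Set.contains S old then (st.1.insert old none, st.2)
              else (st.1.insert old (some st.2), st.2 + 1))
            (PySem.Dict.empty, 0)).1.items
        = (PySem.List.pyRange 0 ic 1).map (fun i => (i, pvVal S i)) := by
          rw [← hcast, pv_foldA S ic.toNat]
      _ = (PySem.List.pyRange 0 ic 1).map (fun old => (old,
            if PySem.Set.contains S old then none
            else some (old - (pvBisectLeft (pvDels ic di) old 0
                                (pvDels ic di).length : Int)))) := by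
          apply List.map_congr_left
          intro i hi
          rw [hS, pv_B_val di ic i hi]
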